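-- pv_equiv track=rewrite | github.com/aivovk/advent_of_code | 2020/18/solution.py | findNextToken
-- ===== SOURCE A (Python) =====
-- def findNextToken(expr):
--     stack = 0
--     for i, c in enumerate(expr):
--         if c=='(':
--             stack += 1
--         elif c==')':
--             stack -= 1
--
--         if stack == 0:
--             return i + 1
-- ===== SOURCE B (Python) =====
-- def findNextToken(expr):
--     # Two-stage: build running paren-depth prefix sums, then search them.
--     deltas = [1 if c == '(' else (-1 if c == ')' else 0) for c in expr]
--     sums = []
--     total = 0
--     for d in deltas:
--         total += d
--         sums.append(total)
--     for i, s in enumerate(sums):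
--         if s == 0:
--             return i + 1
-- ===== Notes on version B (the rewrite author's own statement) =====
-- stated objective: alternative
-- what changed: B separates the computation: it first materialises the per-character paren deltas and their running prefix sums, then searches that sequence for the first zero, instead of A's single fused counter loop with early return.
import Mathlib
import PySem

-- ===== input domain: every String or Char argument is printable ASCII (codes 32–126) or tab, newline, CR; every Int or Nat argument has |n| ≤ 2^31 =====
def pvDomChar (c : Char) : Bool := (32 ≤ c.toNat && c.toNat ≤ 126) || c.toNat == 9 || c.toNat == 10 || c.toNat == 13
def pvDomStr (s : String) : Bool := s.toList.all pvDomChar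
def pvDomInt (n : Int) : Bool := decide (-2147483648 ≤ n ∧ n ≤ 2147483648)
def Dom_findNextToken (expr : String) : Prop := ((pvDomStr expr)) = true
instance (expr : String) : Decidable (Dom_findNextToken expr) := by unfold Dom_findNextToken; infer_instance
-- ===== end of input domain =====

-- B restructures A's fused counter loop into two stages (deltas + prefix sums, then search); same values on all inputs.

-- ===== PORT A =====
-- literal port of A's single loop: counter 'stack', early return at the first zero
def findNextTokenGo (cs : List Char) (stack : Int) (i : Int) : Option Int :=
  match cs with
  | [] => none
  | c :: rest =>
    let stack' := if c = '(' then stack + 1 else if c = ')' then stack - 1 else stack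
    if stack' = 0 then some (i + 1) else findNextTokenGo rest stack' (i + 1)

def findNextToken (expr : String) : Option Int :=
  findNextTokenGo expr.toList 0 0

-- ===== PORT B =====
def pvDelta (c : Char) : Int := if c = '(' then 1 else if c = ')' then -1 else 0

-- running prefix sums of the deltas (stage 1 of Source B)
def pvPrefixSums (total : Int) (ds : List Int) : List Int :=
  match ds with
  | [] => []
  | d :: rest => (total + d) :: pvPrefixSums (total + d) rest

-- search the prefix-sum sequence for the first zero (stage 2 of Source B)
def pvFindZero (xs : List Int) (i : Int) : Option Int :=
  match xs with
  | [] => none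
  | x :: rest => if x = 0 then some (i + 1) else pvFindZero rest (i + 1)

def findNextToken_alt (expr : String) : Option Int :=
  pvFindZero (pvPrefixSums 0 (expr.toList.map pvDelta)) 0

-- ===== PRECONDITION & SPEC =====
def Spec_findNextToken (expr : String) (out : Option Int) : Prop := out = findNextToken_alt expr
instance (expr : String) (out : Option Int) : Decidable (Spec_findNextToken expr out) := by unfold Spec_findNextToken; infer_instance

-- ===== CLAIM (what is proved, stated in full; the proofs are below) =====
def Claim_equal_findNextToken : Prop := ∀ (expr : String), Dom_findNextToken expr → Spec_findNextToken expr (findNextToken expr)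

-- ===== LEMMAS AND PROOFS =====
theorem findNextTokenGo_eq (cs : List Char) (stack i : Int) :
    findNextTokenGo cs stack i = pvFindZero (pvPrefixSums stack (cs.map pvDelta)) i := by
  induction cs generalizing stack i with
  | nil => rfl
  | cons c rest ih =>
    simp only [findNextTokenGo, List.map, pvPrefixSums, pvFindZero, pvDelta]
    by_cases h1 : c = '(' <;> by_cases h2 : c = ')' <;>
      simp [h1, h2, ih, sub_eq_add_neg]

-- ===== VERDICT (by name: the statement is the Claim_ definition above) =====
theorem findNextToken_spec : Claim_equal_findNextToken := by
  intro expr _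
  unfold Spec_findNextToken findNextToken findNextToken_alt
  exact findNextTokenGo_eq _ _ _
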